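-- pv_equiv track=rewrite | github.com/Osc2405/pbi-docs | pbi_extractor/formatters.py | get_dax_complexity_score
-- ===== SOURCE A (Python) =====
-- def get_dax_complexity_score(expression: str) -> int:
--     """Calculates a complexity score for DAX expressions.
--
--     Args:
--         expression: DAX expression to analyze
--
--     Returns:
--         int: Complexity score (higher = more complex)
--     """
--     if not expression:
--         return 0
--
--     score = 0
--
--     # Complex functions
--     complex_functions = ['IF', 'SWITCH', 'CALCULATE', 'FILTER', 'ALL', 'VALUES']
--     for func in complex_functions:
--         score += expression.upper().count(func) * 3
--
--     # Operators
--     operators = ['+', '-', '*', '/', '=', '<', '>', '!']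
--     for op in operators:
--         score += expression.count(op)
--
--     # Nested parentheses
--     max_nesting = 0
--     current_nesting = 0
--     for char in expression:
--         if char == '(':
--             current_nesting += 1
--             max_nesting = max(max_nesting, current_nesting)
--         elif char == ')':
--             current_nesting -= 1
--
--     score += max_nesting * 2
--
--     # Length
--     score += len(expression) // 50
--
--     return score
-- ===== SOURCE B (Python) =====
-- def get_dax_complexity_score(expression: str) -> int:
--     """Single-pass variant: one traversal of the expression counts operator
--     characters and tracks parenthesis nesting at the same time."""
--     if not expression:
--         return 0
--
--     upper = expression.upper()
--     score = 0
--     for func in ('IF', 'SWITCH', 'CALCULATE', 'FILTER', 'ALL', 'VALUES'):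
--         score += upper.count(func) * 3
--
--     operators = {'+', '-', '*', '/', '=', '<', '>', '!'}
--     current_nesting = 0
--     max_nesting = 0
--     for ch in expression:
--         if ch in operators:
--             score += 1
--         elif ch == '(':
--             current_nesting += 1
--             if current_nesting > max_nesting:
--                 max_nesting = current_nesting
--         elif ch == ')':
--             current_nesting -= 1
--
--     return score + max_nesting * 2 + len(expression) // 50
-- ===== Notes on version B (the rewrite author's own statement) =====
-- stated objective: simpler
-- what changed: The eight separate str.count scans for operators and the extra parenthesis-nesting pass are fused into a single character traversal maintaining score, current and max nesting together.
import Mathlib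
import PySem

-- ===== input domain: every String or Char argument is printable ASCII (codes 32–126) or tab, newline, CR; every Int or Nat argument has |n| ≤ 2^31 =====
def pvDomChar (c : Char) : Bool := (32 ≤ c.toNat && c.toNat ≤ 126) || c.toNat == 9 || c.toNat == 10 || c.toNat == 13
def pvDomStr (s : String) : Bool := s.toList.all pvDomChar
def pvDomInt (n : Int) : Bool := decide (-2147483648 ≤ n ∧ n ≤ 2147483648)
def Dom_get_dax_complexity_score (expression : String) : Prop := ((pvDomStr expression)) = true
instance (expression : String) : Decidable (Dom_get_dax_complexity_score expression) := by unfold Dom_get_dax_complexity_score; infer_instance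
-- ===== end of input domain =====

-- ===== PORT A =====
-- B fuses A's eight per-operator .count scans and A's separate parenthesis-nesting
-- pass into one character traversal (objective: simpler; return value only).

-- step of A's parenthesis-nesting loop, state = (max_nesting, current_nesting)
def pvNestStep (p : Int × Int) (ch : Char) : Int × Int :=
  if ch == '(' then
    let cur := p.2 + 1
    (max p.1 cur, cur)
  else if ch == ')' then (p.1, p.2 - 1)
  else p

def get_dax_complexity_score (expression : String) : Int :=
  if expression.toList.isEmpty then 0
  else
    let score : Int := 0
    let score := (["IF", "SWITCH", "CALCULATE", "FILTER", "ALL", "VALUES"] : List String).foldl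
      (fun s func => s + (PySem.Str.count (PySem.Str.upper expression) func : Int) * 3) score
    let score := (["+", "-", "*", "/", "=", "<", ">", "!"] : List String).foldl
      (fun s op => s + (PySem.Str.count expression op : Int)) score
    let nest := expression.toList.foldl pvNestStep (0, 0)
    let score := score + nest.1 * 2
    let score := score + PySem.Int.floordiv (PySem.Str.len expression : Int) 50
    score

-- ===== PORT B =====
-- the operator character set of Source B
def pvOps : List Char := ['+', '-', '*', '/', '=', '<', '>', '!']

-- step of B's fused loop, state = (score, current_nesting, max_nesting)
def pvAltStep (st : Int × Int × Int) (ch : Char) : Int × Int × Int :=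
  if pvOps.contains ch then (st.1 + 1, st.2.1, st.2.2)
  else if ch == '(' then
    let cur := st.2.1 + 1
    (st.1, cur, if cur > st.2.2 then cur else st.2.2)
  else if ch == ')' then (st.1, st.2.1 - 1, st.2.2)
  else st

def get_dax_complexity_score_alt (expression : String) : Int :=
  if expression.toList.isEmpty then 0
  else
    let upper := PySem.Str.upper expression
    let score := (["IF", "SWITCH", "CALCULATE", "FILTER", "ALL", "VALUES"] : List String).foldl
      (fun s func => s + (PySem.Str.count upper func : Int) * 3) (0 : Int)
    let st := expression.toList.foldl pvAltStep (score, 0, 0)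
    st.1 + st.2.2 * 2 + PySem.Int.floordiv (PySem.Str.len expression : Int) 50

-- ===== PRECONDITION & SPEC =====
def Spec_get_dax_complexity_score (expression : String) (out : Int) : Prop := out = get_dax_complexity_score_alt expression
instance (expression : String) (out : Int) : Decidable (Spec_get_dax_complexity_score expression out) := by unfold Spec_get_dax_complexity_score; infer_instance

-- ===== CLAIM (what is proved, stated in full; the proofs are below) =====
def Claim_equal_get_dax_complexity_score : Prop := ∀ (expression : String), Dom_get_dax_complexity_score expression → Spec_get_dax_complexity_score expression (get_dax_complexity_score expression)

-- ===== LEMMAS AND PROOFS =====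

-- single-character substring count (Python str.count of a 1-char string) is List.count
theorem pv_go_single (c : Char) : ∀ (l : List Char) (fuel acc : Nat), l.length ≤ fuel →
    PySem.Chars.count.go [c] fuel l acc = acc + l.count c := by
  intro l
  induction l with
  | nil => intro fuel acc _; cases fuel <;> simp [PySem.Chars.count.go]
  | cons h t ih =>
    intro fuel acc hf
    cases fuel with
    | zero => simp at hf
    | succ f =>
      simp only [PySem.Chars.count.go]
      by_cases hc : c = h
      · subst hc
        simp [List.isPrefixOf, ih f (acc + 1) (by simpa using hf), List.count_cons]
        omega
      · simp [List.isPrefixOf, hc, Ne.symm hc, ih f acc (by simpa using hf)]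

theorem pv_count_single (l : List Char) (c : Char) : PySem.Chars.count l [c] = l.count c := by
  simp [PySem.Chars.count, pv_go_single c l l.length 0 le_rfl]

theorem pv_count_sum (l : List Char) :
    l.count '+' + l.count '-' + l.count '*' + l.count '/' + l.count '=' +
      l.count '<' + l.count '>' + l.count '!' = l.countP (fun ch => pvOps.contains ch) := by
  induction l with
  | nil => rfl
  | cons h t ih =>
    by_cases hm : h ∈ pvOps
    · have hcnt : List.countP (fun ch => pvOps.contains ch) (h :: t)
          = List.countP (fun ch => pvOps.contains ch) t + 1 := by
        simp [List.countP_cons, hm]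
      simp only [pvOps, List.mem_cons, List.not_mem_nil, or_false] at hm
      rcases hm with rfl | rfl | rfl | rfl | rfl | rfl | rfl | rfl <;>
        · simp only [List.count_cons, hcnt, ← ih]
          simp
          omega
    · have hcnt : List.countP (fun ch => pvOps.contains ch) (h :: t)
          = List.countP (fun ch => pvOps.contains ch) t := by
        simp [List.countP_cons, hm]
      have h8 : ¬(h = '+' ∨ h = '-' ∨ h = '*' ∨ h = '/' ∨ h = '=' ∨ h = '<' ∨ h = '>' ∨ h = '!') := by
        simpa [pvOps] using hm
      simp only [not_or] at h8
      obtain ⟨h1, h2, h3, h4, h5, h6, h7, h8'⟩ := h8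
      simp only [List.count_cons, hcnt, ← ih]
      simp [h1, h2, h3, h4, h5, h6, h7, h8']

theorem pv_alt_fold (l : List Char) : ∀ (s c m : Int),
    l.foldl pvAltStep (s, c, m) =
      (s + (l.countP (fun ch => pvOps.contains ch) : Int),
        (l.foldl pvNestStep (m, c)).2, (l.foldl pvNestStep (m, c)).1) := by
  induction l with
  | nil => intro s c m; simp
  | cons h t ih =>
    intro s c m
    by_cases hm : h ∈ pvOps
    · have hp : (h == '(') = false ∧ (h == ')') = false := by
        simp only [pvOps, List.mem_cons, List.not_mem_nil, or_false] at hm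
        rcases hm with rfl | rfl | rfl | rfl | rfl | rfl | rfl | rfl <;> exact ⟨rfl, rfl⟩
      have hstep : pvAltStep (s, c, m) h = (s + 1, c, m) := by
        simp [pvAltStep, hm]
      have hnest : pvNestStep (m, c) h = (m, c) := by
        simp [pvNestStep, hp.1, hp.2]
      have hcnt : List.countP (fun ch => pvOps.contains ch) (h :: t)
          = List.countP (fun ch => pvOps.contains ch) t + 1 := by
        simp [List.countP_cons, hm]
      rw [List.foldl_cons, List.foldl_cons, hstep, hnest, ih, hcnt]
      simp only [Prod.mk.injEq, and_true, and_self]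
      all_goals (push_cast; ring)
    · have hcnt : List.countP (fun ch => pvOps.contains ch) (h :: t)
          = List.countP (fun ch => pvOps.contains ch) t := by
        simp [List.countP_cons, hm]
      by_cases ho : h = '('
      · subst ho
        have hstep : pvAltStep (s, c, m) '(' = (s, c + 1, max m (c + 1)) := by
          simp [pvAltStep, hm]
          split <;> omega
        have hnest : pvNestStep (m, c) '(' = (max m (c + 1), c + 1) := by
          simp [pvNestStep]
        rw [List.foldl_cons, List.foldl_cons, hstep, hnest, ih, hcnt]
      · by_cases hcl : h = ')'
        · subst hcl
          have hstep : pvAltStep (s, c, m) ')' = (s, c - 1, m) := by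
            simp [pvAltStep, hm]
          have hnest : pvNestStep (m, c) ')' = (m, c - 1) := by
            simp [pvNestStep]
          rw [List.foldl_cons, List.foldl_cons, hstep, hnest, ih, hcnt]
        · have hstep : pvAltStep (s, c, m) h = (s, c, m) := by
            simp [pvAltStep, hm, ho, hcl]
          have hnest : pvNestStep (m, c) h = (m, c) := by
            simp [pvNestStep, ho, hcl]
          rw [List.foldl_cons, List.foldl_cons, hstep, hnest, ih, hcnt]

-- ===== VERDICT (by name: the statement is the Claim_ definition above) =====
theorem get_dax_complexity_score_spec : Claim_equal_get_dax_complexity_score := by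
  intro expression _
  unfold Spec_get_dax_complexity_score get_dax_complexity_score get_dax_complexity_score_alt
  by_cases he : expression.toList.isEmpty
  · simp [he]
  · have h1 : ("+" : String).toList = ['+'] := rfl
    have h2 : ("-" : String).toList = ['-'] := rfl
    have h3 : ("*" : String).toList = ['*'] := rfl
    have h4 : ("/" : String).toList = ['/'] := rfl
    have h5 : ("=" : String).toList = ['='] := rfl
    have h6 : ("<" : String).toList = ['<'] := rfl
    have h7 : (">" : String).toList = ['>'] := rfl
    have h8 : ("!" : String).toList = ['!'] := rfl
    simp only [he, if_false, List.foldl_cons, List.foldl_nil,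
      PySem.Str.count_eq, h1, h2, h3, h4, h5, h6, h7, h8, pv_count_single,
      pv_alt_fold]
    rw [← pv_count_sum expression.toList]
    push_cast
    ring
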